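-- pv_equiv track=rewrite | github.com/sophiallen/wordsearch | wordSearch.py | hzSearch
-- ===== SOURCE A (Python) =====
-- def buildWord(L):
--     word = ''
--     for ltr in L:
--         word += ltr
--     return word
--
-- def hzSearch(dictionary, matrix, n):
--     '''searches rows horizontally for words'''
--     wordsFound = []
--     for row in matrix:
--         for i in range(n): #each letter in the row
--             wordlen = 2  #keep track to the word length, which must be at least two letters long.
--             while wordlen+i <= n: #while the length is less than the length of the row
--                 word = buildWord(row[i:i+wordlen])
--                 if word in dictionary and word not in wordsFound:
--                     wordsFound.append(word)
--                 wordlen += 1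
--     return wordsFound
-- ===== SOURCE B (Python) =====
-- def hzSearch(dictionary, matrix, n):
--     '''searches rows horizontally for words'''
--     seen = set()
--     wordsFound = []
--     for row in matrix:
--         for i in range(n):
--             w = ''.join(row[i:i + 2])
--             for wl in range(2, n - i + 1):
--                 if w in dictionary and w not in seen:
--                     seen.add(w)
--                     wordsFound.append(w)
--                 if i + wl < len(row):
--                     w += row[i + wl]
--     return wordsFound
-- ===== Notes on version B (the rewrite author's own statement) =====
-- stated objective: faster
-- what changed: B builds each candidate word incrementally by extending the previous one with the next cell instead of re-joining the slice from scratch, and replaces A's linear 'word not in wordsFound' list scan with an O(1) seen-set, keeping the output list for order.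
import Mathlib
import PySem

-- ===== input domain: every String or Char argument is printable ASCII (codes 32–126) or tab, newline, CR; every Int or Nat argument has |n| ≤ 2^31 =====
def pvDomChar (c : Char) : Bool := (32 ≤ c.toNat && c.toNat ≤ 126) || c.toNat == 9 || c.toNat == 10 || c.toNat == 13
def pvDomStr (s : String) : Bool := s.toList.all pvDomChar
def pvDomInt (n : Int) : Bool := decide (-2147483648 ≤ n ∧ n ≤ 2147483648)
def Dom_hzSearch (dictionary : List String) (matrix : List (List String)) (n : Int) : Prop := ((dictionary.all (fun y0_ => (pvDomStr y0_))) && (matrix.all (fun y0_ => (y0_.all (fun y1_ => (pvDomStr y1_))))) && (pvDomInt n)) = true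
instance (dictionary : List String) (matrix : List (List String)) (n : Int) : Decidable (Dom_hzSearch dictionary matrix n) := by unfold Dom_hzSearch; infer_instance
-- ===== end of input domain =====

-- B replaces A's per-position word rebuild and found-list scans by incremental
-- string extension plus a seen-set (objective: faster).


-- ===== PORT A =====
def buildWord (L : List String) : String :=
  L.foldl (fun word ltr => word ++ ltr) ""

-- A's 'while wordlen+i <= n' loop (wl = wordlen)
def hzWhileA (dictionary : List String) (row : List String) (n i wl : Int)
    (wordsFound : List String) : List String :=
  if h : wl + i ≤ n then
    let word := buildWord (PySem.List.slice row (some i) (some (i + wl)))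
    let wf := if word ∈ dictionary ∧ word ∉ wordsFound then wordsFound ++ [word] else wordsFound
    hzWhileA dictionary row n i (wl + 1) wf
  else wordsFound
termination_by (n - i - wl + 1).toNat
decreasing_by omega

def hzSearch (dictionary : List String) (matrix : List (List String)) (n : Int) : List String :=
  matrix.foldl (fun wordsFound row =>
    (PySem.List.pyRange 0 n 1).foldl (fun wf i => hzWhileA dictionary row n i 2 wf) wordsFound) []

-- ===== PORT B =====
-- B's 'for wl in range(2, n-i+1)' loop, carrying the incrementally built word w
-- and the state (seen, wordsFound)
def hzForB (dictionary : List String) (row : List String) (i : Int) (wls : List Int)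
    (w : String) (st : PySem.Set String × List String) : PySem.Set String × List String :=
  match wls with
  | [] => st
  | wl :: rest =>
      let st' := if PySem.Set.contains dictionary w && !(PySem.Set.contains st.1 w)
                 then (PySem.Set.add st.1 w, st.2 ++ [w]) else st
      let w' := if i + wl < (row.length : Int) then w ++ PySem.List.pyGetD row (i + wl) "" else w
      hzForB dictionary row i rest w' st'

def hzSearch_alt (dictionary : List String) (matrix : List (List String)) (n : Int) : List String :=
  (matrix.foldl (fun st row =>
    (PySem.List.pyRange 0 n 1).foldl (fun st i =>
      hzForB dictionary row i (PySem.List.pyRange 2 (n - i + 1) 1)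
        (PySem.Str.join "" (PySem.List.slice row (some i) (some (i + 2)))) st) st)
    ((PySem.Set.empty : PySem.Set String), ([] : List String))).2

-- ===== PRECONDITION & SPEC =====
def Spec_hzSearch (dictionary : List String) (matrix : List (List String)) (n : Int) (out : List String) : Prop := out = hzSearch_alt dictionary matrix n
instance (dictionary : List String) (matrix : List (List String)) (n : Int) (out : List String) : Decidable (Spec_hzSearch dictionary matrix n out) := by unfold Spec_hzSearch; infer_instance

-- ===== CLAIM (what is proved, stated in full; the proofs are below) =====
def Claim_equal_hzSearch : Prop := ∀ (dictionary : List String) (matrix : List (List String)) (n : Int), Dom_hzSearch dictionary matrix n → Spec_hzSearch dictionary matrix n (hzSearch dictionary matrix n)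

-- ===== LEMMAS AND PROOFS =====

lemma chars_join_nil_sep (M : List (List Char)) : PySem.Chars.join [] M = M.flatten := by
  induction M with
  | nil => simp [PySem.Chars.join_nil]
  | cons x xs ih =>
      cases xs with
      | nil => simp [PySem.Chars.join_singleton]
      | cons y ys => rw [PySem.Chars.join_cons_cons]; simp at ih ⊢; simp [ih]

lemma strJoin_empty (L : List String) :
    PySem.Str.join "" L = String.ofList ((L.map String.toList).flatten) := by
  simp [PySem.Str.join, chars_join_nil_sep]

lemma strJoin_empty_snoc (L : List String) (x : String) :
    PySem.Str.join "" (L ++ [x]) = PySem.Str.join "" L ++ x := by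
  simp [strJoin_empty, String.ofList_append]

lemma buildWord_eq_join (L : List String) : buildWord L = PySem.Str.join "" L := by
  have h : ∀ (M : List String) (acc : String),
      M.foldl (fun word ltr => word ++ ltr) acc = acc ++ PySem.Str.join "" M := by
    intro M
    induction M with
    | nil => intro acc; simp [strJoin_empty]
    | cons x xs ih =>
        intro acc
        have hx : PySem.Str.join "" (x :: xs) = x ++ PySem.Str.join "" xs := by
          simp [strJoin_empty, String.ofList_append]
        simp [List.foldl, ih, hx, String.append_assoc]
  have := h L ""
  simpa [buildWord] using this

lemma slice_snoc (row : List String) (i wl : Int) (h0 : 0 ≤ i) (h2 : 0 ≤ wl) :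
    PySem.List.slice row (some i) (some (i + wl + 1)) =
    PySem.List.slice row (some i) (some (i + wl)) ++
      (if i + wl < (row.length : Int) then [PySem.List.pyGetD row (i + wl) ""] else []) := by
  rw [PySem.List.slice_toNat _ h0 (by omega), PySem.List.slice_toNat _ h0 (by omega)]
  have e1 : (i + wl + 1).toNat - i.toNat = (i + wl).toNat - i.toNat + 1 := by omega
  rw [e1, List.take_add_one]
  congr 1
  have hlt : (row.drop i.toNat)[(i + wl).toNat - i.toNat]? = row[(i + wl).toNat]? := by
    rw [List.getElem?_drop]; congr 1; omega
  have hcast : i + wl = (((i + wl).toNat : Nat) : Int) := by omega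
  by_cases h : i + wl < (row.length : Int)
  · have hn : (i + wl).toNat < row.length := by omega
    rw [hlt, List.getElem?_eq_getElem hn, if_pos h]
    conv_rhs => rw [hcast, PySem.List.pyGetD_natCast]
    simp [List.getD_eq_getElem?_getD, List.getElem?_eq_getElem hn]
  · have hnone : row[(i + wl).toNat]? = none := List.getElem?_eq_none (by omega)
    rw [hlt, hnone, if_neg h]
    rfl

-- the inner loops agree when B's seen-set equals the found list
lemma inner_eq (dictionary row : List String) (n i : Int) (h0 : 0 ≤ i) :
    ∀ (wl : Int) (found : List String), 0 ≤ wl →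
    hzForB dictionary row i (PySem.List.pyRange wl (n - i + 1) 1)
        (PySem.Str.join "" (PySem.List.slice row (some i) (some (i + wl)))) (found, found)
      = (hzWhileA dictionary row n i wl found, hzWhileA dictionary row n i wl found) := by
  suffices H : ∀ (k : Nat) (wl : Int) (found : List String), 0 ≤ wl → (n - i - wl + 1).toNat ≤ k →
      hzForB dictionary row i (PySem.List.pyRange wl (n - i + 1) 1)
          (PySem.Str.join "" (PySem.List.slice row (some i) (some (i + wl)))) (found, found)
        = (hzWhileA dictionary row n i wl found, hzWhileA dictionary row n i wl found) by
    intro wl found hwl; exact H (n - i - wl + 1).toNat wl found hwl le_rfl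
  intro k
  induction k with
  | zero =>
      intro wl found hwl hk
      have h : ¬ wl + i ≤ n := by omega
      rw [PySem.List.pyRange_one_eq_nil (by omega), hzWhileA, dif_neg h]
      rfl
  | succ k ih =>
      intro wl found hwl hk
      by_cases h : wl + i ≤ n
      · rw [PySem.List.pyRange_one_cons (by omega : wl < n - i + 1)]
        rw [hzWhileA, dif_pos h]
        simp only [hzForB, buildWord_eq_join]
        set w := PySem.Str.join "" (PySem.List.slice row (some i) (some (i + wl))) with hw
        have hstep : (if i + wl < (row.length : Int)
              then w ++ PySem.List.pyGetD row (i + wl) "" else w)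
            = PySem.Str.join "" (PySem.List.slice row (some i) (some (i + (wl + 1)))) := by
          have : i + (wl + 1) = i + wl + 1 := by omega
          rw [this, slice_snoc row i wl h0 (by omega)]
          by_cases hb : i + wl < (row.length : Int)
          · rw [if_pos hb, if_pos hb, strJoin_empty_snoc]
          · rw [if_neg hb, if_neg hb, List.append_nil]
        have hiff : ((PySem.Set.contains dictionary w && !(PySem.Set.contains found w)) = true)
            ↔ (w ∈ dictionary ∧ w ∉ found) := by
          simp [PySem.Set.contains]
        by_cases hc : w ∈ dictionary ∧ w ∉ found
        · have hadd : PySem.Set.add found w = found ++ [w] := by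
            simp [PySem.Set.add, PySem.Set.contains, hc.2]
          rw [if_pos (hiff.mpr hc), if_pos hc, hadd, hstep]
          exact ih (wl + 1) (found ++ [w]) (by omega) (by omega)
        · rw [if_neg (fun hb => hc (hiff.mp hb)), if_neg hc, hstep]
          exact ih (wl + 1) found (by omega) (by omega)
      · rw [PySem.List.pyRange_one_eq_nil (by omega), hzWhileA, dif_neg h]
        rfl

lemma outer_row_eq (dictionary row : List String) (n : Int) :
    ∀ (is : List Int) (found : List String), (∀ j ∈ is, 0 ≤ j) →
    is.foldl (fun st i =>
      hzForB dictionary row i (PySem.List.pyRange 2 (n - i + 1) 1)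
        (PySem.Str.join "" (PySem.List.slice row (some i) (some (i + 2)))) st) (found, found)
      = (is.foldl (fun wf i => hzWhileA dictionary row n i 2 wf) found,
         is.foldl (fun wf i => hzWhileA dictionary row n i 2 wf) found) := by
  intro is
  induction is with
  | nil => intro found _; rfl
  | cons i rest ih =>
      intro found hpos
      have h0 : (0:Int) ≤ i := hpos i (by simp)
      simp only [List.foldl]
      rw [inner_eq dictionary row n i h0 2 found (by omega)]
      exact ih _ (fun j hj => hpos j (by simp [hj]))

lemma matrix_eq (dictionary : List String) (n : Int) :
    ∀ (rows : List (List String)) (found : List String),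
    rows.foldl (fun st row =>
      (PySem.List.pyRange 0 n 1).foldl (fun st i =>
        hzForB dictionary row i (PySem.List.pyRange 2 (n - i + 1) 1)
          (PySem.Str.join "" (PySem.List.slice row (some i) (some (i + 2)))) st) st) (found, found)
      = (rows.foldl (fun wordsFound row =>
          (PySem.List.pyRange 0 n 1).foldl (fun wf i => hzWhileA dictionary row n i 2 wf) wordsFound) found,
         rows.foldl (fun wordsFound row =>
          (PySem.List.pyRange 0 n 1).foldl (fun wf i => hzWhileA dictionary row n i 2 wf) wordsFound) found) := by
  intro rows
  induction rows with
  | nil => intro found; rfl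
  | cons row rest ih =>
      intro found
      simp only [List.foldl]
      rw [outer_row_eq dictionary row n (PySem.List.pyRange 0 n 1) found
        (fun j hj => by
          have := (PySem.List.mem_pyRange_one).1 hj
          omega)]
      exact ih _

-- ===== VERDICT (by name: the statement is the Claim_ definition above) =====
theorem hzSearch_spec : Claim_equal_hzSearch := by
  intro dictionary matrix n _
  unfold Spec_hzSearch hzSearch hzSearch_alt
  have he : (PySem.Set.empty : PySem.Set String) = ([] : List String) := rfl
  rw [he, matrix_eq dictionary n matrix []]
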